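-- pv_equiv track=rewrite | github.com/CTG813819/lvl_up | ai-backend-python/app/services/conquest_ai_service.py | _determine_app_type
-- ===== SOURCE A (Python) =====
-- from typing import Dict, List, Optional, Any, Tuple
--
-- def _determine_app_type(keywords: List[str], description: str) -> str:
--     """Determine app type based on keywords and description"""
--     text = (description + " " + " ".join(keywords)).lower()
--
--     if any(word in text for word in ["game", "gaming", "play", "score", "level"]):
--         return "game"
--     elif any(word in text for word in ["social", "chat", "message", "friend", "profile"]):
--         return "social"
--     elif any(word in text for word in ["fitness", "workout", "exercise", "health", "track"]):
--         return "fitness"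
--     elif any(word in text for word in ["productivity", "task", "todo", "reminder", "schedule"]):
--         return "productivity"
--     elif any(word in text for word in ["education", "learn", "study", "course", "quiz"]):
--         return "education"
--     else:
--         return "general"
-- ===== SOURCE B (Python) =====
-- _CATEGORIES = ["game", "social", "fitness", "productivity", "education"]
--
-- # marker words indexed by first letter, each with the priority of its category
-- _BY_FIRST = {
--     "g": [("game", 0), ("gaming", 0)],
--     "p": [("play", 0), ("profile", 1), ("productivity", 3)],
--     "s": [("score", 0), ("social", 1), ("schedule", 3), ("study", 4)],
--     "l": [("level", 0), ("learn", 4)],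
--     "c": [("chat", 1), ("course", 4)],
--     "m": [("message", 1)],
--     "f": [("friend", 1), ("fitness", 2)],
--     "w": [("workout", 2)],
--     "e": [("exercise", 2), ("education", 4)],
--     "h": [("health", 2)],
--     "t": [("track", 2), ("task", 3), ("todo", 3)],
--     "r": [("reminder", 3)],
--     "q": [("quiz", 4)],
-- }
--
-- def _determine_app_type(keywords, description):
--     """Determine app type: scan the text left to right once; at each position
--     look up the marker words that could start there by their first letter and
--     keep the best (lowest) category priority seen."""
--     text = (description + " " + " ".join(keywords)).lower()
--     best = len(_CATEGORIES)
--     for i, ch in enumerate(text):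
--         for word, priority in _BY_FIRST.get(ch, ()):
--             if priority < best and text.startswith(word, i):
--                 best = priority
--     return _CATEGORIES[best] if best < len(_CATEGORIES) else "general"
-- ===== Notes on version B (the rewrite author's own statement) =====
-- stated objective: alternative
-- what changed: Replaced the five per-category substring-test branches by a single left-to-right scan over the text: a first-letter index maps each character to the marker words that could start there, and the scan keeps the minimum category priority of any word found, selecting the category at the end (sentinel = 'general').
import Mathlib
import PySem

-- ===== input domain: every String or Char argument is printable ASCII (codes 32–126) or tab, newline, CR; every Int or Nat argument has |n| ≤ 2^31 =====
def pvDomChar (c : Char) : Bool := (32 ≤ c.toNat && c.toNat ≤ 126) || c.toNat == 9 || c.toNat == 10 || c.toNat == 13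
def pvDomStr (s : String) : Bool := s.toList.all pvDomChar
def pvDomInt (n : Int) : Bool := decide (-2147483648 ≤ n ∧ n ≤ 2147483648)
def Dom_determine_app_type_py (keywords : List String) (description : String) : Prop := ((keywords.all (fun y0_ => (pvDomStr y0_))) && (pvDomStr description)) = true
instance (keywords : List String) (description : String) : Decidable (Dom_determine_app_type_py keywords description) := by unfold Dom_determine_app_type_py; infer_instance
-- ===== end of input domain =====

-- B replaces A's five per-category substring-test branches by one left-to-right scan of the
-- text that minimises the priority of marker words starting at each position (alternative algorithm, not claimed faster).

-- ===== PORT A =====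
-- text = (description + " " + " ".join(keywords)).lower(), on code points (PySem.Chars; exact for str + / join / lower)
def pvText (keywords : List String) (description : String) : List Char :=
  PySem.Chars.lower (description.toList ++ " ".toList ++ PySem.Chars.join " ".toList (keywords.map String.toList))

-- any(word in text for word in ws)
def pvAnyIn (ws : List String) (text : List Char) : Bool :=
  ws.any (fun w => PySem.Chars.isIn w.toList text)

def determine_app_type_py (keywords : List String) (description : String) : String :=
  let text := pvText keywords description
  if pvAnyIn ["game", "gaming", "play", "score", "level"] text then "game"
  else if pvAnyIn ["social", "chat", "message", "friend", "profile"] text then "social"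
  else if pvAnyIn ["fitness", "workout", "exercise", "health", "track"] text then "fitness"
  else if pvAnyIn ["productivity", "task", "todo", "reminder", "schedule"] text then "productivity"
  else if pvAnyIn ["education", "learn", "study", "course", "quiz"] text then "education"
  else "general"

-- ===== PORT B =====
def pvCategoryNames : List String := ["game", "social", "fitness", "productivity", "education"]

-- the _BY_FIRST dict of Source B: marker words indexed by first letter, with category priorities
def pvByFirstDict : PySem.Dict Char (List (List Char × Nat)) :=
  PySem.Dict.mk
    [('g', [("game".toList, 0), ("gaming".toList, 0)]),
     ('p', [("play".toList, 0), ("profile".toList, 1), ("productivity".toList, 3)]),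
     ('s', [("score".toList, 0), ("social".toList, 1), ("schedule".toList, 3), ("study".toList, 4)]),
     ('l', [("level".toList, 0), ("learn".toList, 4)]),
     ('c', [("chat".toList, 1), ("course".toList, 4)]),
     ('m', [("message".toList, 1)]),
     ('f', [("friend".toList, 1), ("fitness".toList, 2)]),
     ('w', [("workout".toList, 2)]),
     ('e', [("exercise".toList, 2), ("education".toList, 4)]),
     ('h', [("health".toList, 2)]),
     ('t', [("track".toList, 2), ("task".toList, 3), ("todo".toList, 3)]),
     ('r', [("reminder".toList, 3)]),
     ('q', [("quiz".toList, 4)])]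

-- _BY_FIRST.get(ch, ())
def pvLookup (c : Char) : List (List Char × Nat) := pvByFirstDict.getD c []

-- the scan loop of Source B; text.startswith(word, i) = Chars.startswith (text.drop i) word,
-- exact here since enumerate indices satisfy 0 ≤ i < len(text) (so .toNat is lossless)
def pvBest (text : List Char) : Nat :=
  (PySem.List.enumerate text 0).foldl
    (fun best ic =>
      (pvLookup ic.2).foldl
        (fun best wp =>
          if wp.2 < best && PySem.Chars.startswith (text.drop ic.1.toNat) wp.1 then wp.2 else best)
        best)
    pvCategoryNames.length

def determine_app_type_py_alt (keywords : List String) (description : String) : String :=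
  let text := pvText keywords description
  let best := pvBest text
  if best < pvCategoryNames.length then pvCategoryNames.getD best "general" else "general"

-- ===== PRECONDITION & SPEC =====
def Spec_determine_app_type_py (keywords : List String) (description : String) (out : String) : Prop := out = determine_app_type_py_alt keywords description
instance (keywords : List String) (description : String) (out : String) : Decidable (Spec_determine_app_type_py keywords description out) := by unfold Spec_determine_app_type_py; infer_instance

-- ===== CLAIM (what is proved, stated in full; the proofs are below) =====
def Claim_equal_determine_app_type_py : Prop := ∀ (keywords : List String) (description : String), Dom_determine_app_type_py keywords description → Spec_determine_app_type_py keywords description (determine_app_type_py keywords description)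

-- ===== LEMMAS AND PROOFS =====

-- proof-side flat list of all (marker word, priority) pairs
def pvWordPriority : List (List Char × Nat) :=
  [("game".toList, 0), ("gaming".toList, 0), ("play".toList, 0), ("score".toList, 0), ("level".toList, 0),
   ("social".toList, 1), ("chat".toList, 1), ("message".toList, 1), ("friend".toList, 1), ("profile".toList, 1),
   ("fitness".toList, 2), ("workout".toList, 2), ("exercise".toList, 2), ("health".toList, 2), ("track".toList, 2),
   ("productivity".toList, 3), ("task".toList, 3), ("todo".toList, 3), ("reminder".toList, 3), ("schedule".toList, 3),
   ("education".toList, 4), ("learn".toList, 4), ("study".toList, 4), ("course".toList, 4), ("quiz".toList, 4)]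

-- generic ≤-characterisation of a minimising foldl
theorem pv_foldl_le_iff {α : Type} (g : Nat → α → Nat) (Q : α → Prop) (p : Nat)
    (H : ∀ b x, g b x ≤ p ↔ b ≤ p ∨ Q x) :
    ∀ (xs : List α) (b0 : Nat), xs.foldl g b0 ≤ p ↔ b0 ≤ p ∨ ∃ x ∈ xs, Q x := by
  intro xs
  induction xs with
  | nil => intro b0; simp
  | cons x xs ih =>
    intro b0
    simp only [List.foldl_cons, ih, H, List.mem_cons]
    constructor
    · rintro ((h | h) | ⟨y, hy, hQ⟩)
      · exact Or.inl h
      · exact Or.inr ⟨x, Or.inl rfl, h⟩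
      · exact Or.inr ⟨y, Or.inr hy, hQ⟩
    · rintro (h | ⟨y, (rfl | hy), hQ⟩)
      · exact Or.inl (Or.inl h)
      · exact Or.inl (Or.inr hQ)
      · exact Or.inr ⟨y, hy, hQ⟩

-- a value read out of a literal Dict.mk is one of its stored value lists
theorem pv_mem_getD_mk {l : List (Char × List (List Char × Nat))} {c : Char}
    {wq : List Char × Nat} (h : wq ∈ ((PySem.Dict.mk l).get? c).getD []) :
    ∃ e ∈ l, wq ∈ e.2 := by
  induction l with
  | nil => simp [PySem.Dict.get?] at h
  | cons x rest ih =>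
    obtain ⟨k, v⟩ := x
    rw [PySem.Dict.get?_mk_cons] at h
    by_cases hk : (k == c) = true
    · rw [if_pos hk] at h
      exact ⟨(k, v), List.mem_cons_self, h⟩
    · rw [if_neg hk] at h
      obtain ⟨e, he, hwq⟩ := ih h
      exact ⟨e, List.mem_cons_of_mem _ he, hwq⟩

-- every entry of the first-letter index is one of the 25 marker pairs
theorem pv_lookup_sub (c : Char) (wq : List Char × Nat) (h : wq ∈ pvLookup c) :
    wq ∈ pvWordPriority := by
  simp only [pvLookup, pvByFirstDict, PySem.Dict.getD] at h
  obtain ⟨e, he, hwq⟩ := pv_mem_getD_mk h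
  fin_cases he <;> fin_cases hwq <;> decide

-- every marker pair is nonempty and is filed under its first letter
theorem pv_lookup_mem : ∀ wq ∈ pvWordPriority, wq.1 ≠ [] ∧ wq ∈ pvLookup (wq.1.headD ' ') := by
  decide

-- master characterisation of the scan
theorem pv_best_le_iff (text : List Char) (p : Nat) :
    pvBest text ≤ p ↔ 5 ≤ p ∨ ∃ wq ∈ pvWordPriority, wq.2 ≤ p ∧ PySem.Chars.isIn wq.1 text = true := by
  have hinner : ∀ (i : Nat) (c : Char) (b : Nat),
      ((pvLookup c).foldl
        (fun best wp =>
          if wp.2 < best && PySem.Chars.startswith (text.drop i) wp.1 then wp.2 else best) b) ≤ p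
      ↔ b ≤ p ∨ ∃ wq ∈ pvLookup c, wq.2 ≤ p ∧ PySem.Chars.startswith (text.drop i) wq.1 = true := by
    intro i c b
    refine pv_foldl_le_iff _ _ p ?_ (pvLookup c) b
    intro b wp
    cases hsw : PySem.Chars.startswith (text.drop i) wp.1
    · simp
    · simp only [Bool.and_true, decide_eq_true_eq, and_true]
      split <;> omega
  have houter : pvBest text ≤ p ↔ 5 ≤ p ∨
      ∃ ic ∈ PySem.List.enumerate text 0, ∃ wq ∈ pvLookup ic.2, wq.2 ≤ p ∧
        PySem.Chars.startswith (text.drop ic.1.toNat) wq.1 = true := by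
    unfold pvBest
    exact pv_foldl_le_iff _ _ p (fun b ic => hinner ic.1.toNat ic.2 b)
      (PySem.List.enumerate text 0) _
  rw [houter]
  constructor
  · rintro (h | ⟨ic, _hic, wq, hmem, hq, hsw⟩)
    · exact Or.inl h
    · refine Or.inr ⟨wq, pv_lookup_sub ic.2 wq hmem, hq, ?_⟩
      exact (PySem.Chars.exists_prefix_drop_iff_isIn _ _).mp
        ⟨ic.1.toNat, (PySem.Chars.startswith_iff _ _).mp hsw⟩
  · rintro (h | ⟨wq, hmem, hq, hin⟩)
    · exact Or.inl h
    · obtain ⟨hne, hfile⟩ := pv_lookup_mem wq hmem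
      obtain ⟨j, hpre⟩ := (PySem.Chars.exists_prefix_drop_iff_isIn _ _).mpr hin
      have hj : j < text.length := by
        by_contra hge
        have : text.drop j = [] := List.drop_eq_nil_of_le (by omega)
        rw [this, List.prefix_nil] at hpre
        exact hne hpre
      have hhead : wq.1.headD ' ' = text[j] := by
        have h1 : (text.drop j).head? = some text[j] := by
          rw [List.head?_drop]
          exact (List.getElem?_eq_some_iff).mpr ⟨hj, rfl⟩
        obtain ⟨t, ht⟩ := hpre
        cases hw : wq.1 with
        | nil => exact absurd hw hne
        | cons a as =>
          rw [hw] at ht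
          rw [← ht] at h1
          simp at h1
          simp [h1]
      refine Or.inr ⟨(0 + (j : Int), text[j]), ?_, wq, ?_, hq, ?_⟩
      · exact (PySem.List.mem_enumerate_iff text 0 _).mpr ⟨j, hj, rfl⟩
      · rw [← hhead] at *
        exact hfile
      · have : ((0 + (j : Int)).toNat) = j := by omega
        rw [this]
        exact (PySem.Chars.startswith_iff _ _).mpr hpre

-- per-priority-level readings of the master lemma, matched against A's group tests
theorem pv_level (text : List Char) (p : Nat) (hp : p < 5) :
    pvBest text ≤ p ↔ ∃ wq ∈ pvWordPriority, wq.2 ≤ p ∧ PySem.Chars.isIn wq.1 text = true := by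
  have h : ¬ (5 ≤ p) := by omega
  rw [pv_best_le_iff]
  simp [h]

theorem pv_anyIn_iff (ws : List String) (text : List Char) :
    pvAnyIn ws text = true ↔ ∃ w ∈ ws, PySem.Chars.isIn w.toList text = true := by
  simp [pvAnyIn]

-- ===== VERDICT (by name: the statement is the Claim_ definition above) =====
theorem determine_app_type_py_spec : Claim_equal_determine_app_type_py := by
  intro keywords description _
  unfold Spec_determine_app_type_py determine_app_type_py determine_app_type_py_alt
  set text := pvText keywords description with htext
  have h5 : pvBest text ≤ 5 := (pv_best_le_iff text 5).mpr (Or.inl le_rfl)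
  have h0 : pvBest text ≤ 0 ↔ pvAnyIn ["game", "gaming", "play", "score", "level"] text = true := by
    rw [pv_level text 0 (by omega), pv_anyIn_iff]; simp only [pvWordPriority, List.exists_mem_cons_iff]
    norm_num
  have h1 : pvBest text ≤ 1 ↔ (pvAnyIn ["game", "gaming", "play", "score", "level"] text = true ∨
      pvAnyIn ["social", "chat", "message", "friend", "profile"] text = true) := by
    rw [pv_level text 1 (by omega), pv_anyIn_iff, pv_anyIn_iff]; simp only [pvWordPriority, List.exists_mem_cons_iff]
    norm_num
    simp only [or_assoc]
  have h2 : pvBest text ≤ 2 ↔ (pvAnyIn ["game", "gaming", "play", "score", "level"] text = true ∨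
      pvAnyIn ["social", "chat", "message", "friend", "profile"] text = true ∨
      pvAnyIn ["fitness", "workout", "exercise", "health", "track"] text = true) := by
    rw [pv_level text 2 (by omega), pv_anyIn_iff, pv_anyIn_iff, pv_anyIn_iff]
    simp only [pvWordPriority, List.exists_mem_cons_iff]
    norm_num
    simp only [or_assoc]
  have h3 : pvBest text ≤ 3 ↔ (pvAnyIn ["game", "gaming", "play", "score", "level"] text = true ∨
      pvAnyIn ["social", "chat", "message", "friend", "profile"] text = true ∨
      pvAnyIn ["fitness", "workout", "exercise", "health", "track"] text = true ∨
      pvAnyIn ["productivity", "task", "todo", "reminder", "schedule"] text = true) := by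
    rw [pv_level text 3 (by omega), pv_anyIn_iff, pv_anyIn_iff, pv_anyIn_iff, pv_anyIn_iff]
    simp only [pvWordPriority, List.exists_mem_cons_iff]
    norm_num
    simp only [or_assoc]
  have h4 : pvBest text ≤ 4 ↔ (pvAnyIn ["game", "gaming", "play", "score", "level"] text = true ∨
      pvAnyIn ["social", "chat", "message", "friend", "profile"] text = true ∨
      pvAnyIn ["fitness", "workout", "exercise", "health", "track"] text = true ∨
      pvAnyIn ["productivity", "task", "todo", "reminder", "schedule"] text = true ∨
      pvAnyIn ["education", "learn", "study", "course", "quiz"] text = true) := by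
    rw [pv_level text 4 (by omega), pv_anyIn_iff, pv_anyIn_iff, pv_anyIn_iff, pv_anyIn_iff,
        pv_anyIn_iff]
    simp only [pvWordPriority, List.exists_mem_cons_iff]
    norm_num
    simp only [or_assoc]
  by_cases g0 : pvAnyIn ["game", "gaming", "play", "score", "level"] text = true
  · have hb : pvBest text = 0 := by have := h0.mpr g0; omega
    simp only [g0, hb, if_true]
    rfl
  by_cases g1 : pvAnyIn ["social", "chat", "message", "friend", "profile"] text = true
  · have hb : pvBest text = 1 := by
      have := h1.mpr (Or.inr g1)
      have := (not_iff_not.mpr h0).mpr g0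
      omega
    simp only [g0, g1, hb, if_true, if_false, Bool.false_eq_true]
    rfl
  by_cases g2 : pvAnyIn ["fitness", "workout", "exercise", "health", "track"] text = true
  · have hb : pvBest text = 2 := by
      have := h2.mpr (Or.inr (Or.inr g2))
      have := (not_iff_not.mpr h1).mpr (not_or.mpr ⟨g0, g1⟩)
      omega
    simp only [g0, g1, g2, hb, if_true, if_false, Bool.false_eq_true]
    rfl
  by_cases g3 : pvAnyIn ["productivity", "task", "todo", "reminder", "schedule"] text = true
  · have hb : pvBest text = 3 := by
      have := h3.mpr (Or.inr (Or.inr (Or.inr g3)))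
      have := (not_iff_not.mpr h2).mpr (not_or.mpr ⟨g0, not_or.mpr ⟨g1, g2⟩⟩)
      omega
    simp only [g0, g1, g2, g3, hb, if_true, if_false, Bool.false_eq_true]
    rfl
  by_cases g4 : pvAnyIn ["education", "learn", "study", "course", "quiz"] text = true
  · have hb : pvBest text = 4 := by
      have := h4.mpr (Or.inr (Or.inr (Or.inr (Or.inr g4))))
      have := (not_iff_not.mpr h3).mpr (not_or.mpr ⟨g0, not_or.mpr ⟨g1, not_or.mpr ⟨g2, g3⟩⟩⟩)
      omega
    simp only [g0, g1, g2, g3, g4, hb, if_false, Bool.false_eq_true]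
    rfl
  · have hb : pvBest text = 5 := by
      have := (not_iff_not.mpr h4).mpr
        (not_or.mpr ⟨g0, not_or.mpr ⟨g1, not_or.mpr ⟨g2, not_or.mpr ⟨g3, g4⟩⟩⟩⟩)
      omega
    simp only [g0, g1, g2, g3, g4, hb, if_false, Bool.false_eq_true]
    rfl
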